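-- pv_equiv track=rewrite | github.com/manhwork/Python-CodePtit | bien_du_lieu_co_ban/day_so_dep.py | count_insert
-- ===== SOURCE A (Python) =====
-- def count_insert(a):
--     cnt = 0
--     for i in range(len(a)-1):
--         x, y = min(a[i],a[i+1]), max(a[i],a[i+1])
--         while y > 2*x :
--             x*= 2
--             cnt += 1
--
--     return cnt
-- ===== SOURCE B (Python) =====
-- def count_insert(a):
--     total = 0
--     for p, q_ in zip(a, a[1:]):
--         lo, hi = min(p, q_), max(p, q_)
--         if hi > 2 * lo:
--             q = -(-hi // lo)          # ceil(hi / lo)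
--             total += (q - 1).bit_length() - 1
--     return total
-- ===== Notes on version B (the rewrite author's own statement) =====
-- stated objective: alternative
-- what changed: Replaces A's inner while-loop that repeatedly doubles the smaller element of each adjacent pair with a per-pair closed form: the count is bit_length(ceil(hi/lo)-1)-1, one ceiling division and one bit_length call per pair; Pre_ excludes inputs with an adjacent pair whose minimum is negative, or zero while its maximum is positive, on which A's while-loop never terminates.
import Mathlib
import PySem

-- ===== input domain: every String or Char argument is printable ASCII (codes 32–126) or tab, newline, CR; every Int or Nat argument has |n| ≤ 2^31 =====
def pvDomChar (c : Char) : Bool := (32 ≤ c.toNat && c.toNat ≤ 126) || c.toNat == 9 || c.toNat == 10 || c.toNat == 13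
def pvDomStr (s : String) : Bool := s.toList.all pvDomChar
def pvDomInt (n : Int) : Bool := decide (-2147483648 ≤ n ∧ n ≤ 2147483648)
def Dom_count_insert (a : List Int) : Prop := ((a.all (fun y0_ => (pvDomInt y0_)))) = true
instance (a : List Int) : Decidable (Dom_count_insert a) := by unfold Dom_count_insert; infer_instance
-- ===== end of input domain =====

-- B replaces A's per-pair doubling loop by a per-pair closed form via ceiling division and bit_length (objective: alternative).

-- ===== PORT A =====
-- A's inner 'while y > 2*x: x *= 2; cnt += 1'.  The extra conjunct '0 < x' is a totality
-- guard only: when x ≤ 0 and y > 2*x the Python loop never terminates (those inputs are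
-- excluded by Pre_count_insert); on all other inputs the conjunct is implied.
def pvWhileA (x y cnt : Int) : Int :=
  if h : 2 * x < y ∧ 0 < x then pvWhileA (2 * x) y (cnt + 1) else cnt
termination_by (y - 2 * x).toNat
decreasing_by omega

def count_insert (a : List Int) : Int :=
  (PySem.List.pyRange 0 ((a.length : Int) - 1) 1).foldl
    (fun cnt i =>
      pvWhileA (min (PySem.List.pyGetD a i 0) (PySem.List.pyGetD a (i + 1) 0))
               (max (PySem.List.pyGetD a i 0) (PySem.List.pyGetD a (i + 1) 0)) cnt) 0

-- ===== PORT B =====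
def pvPairCount (lo hi : Int) : Int :=
  if 2 * lo < hi then
    ((PySem.Int.bitLength (-(PySem.Int.floordiv (-hi) lo) - 1) : Int)) - 1
  else 0

def count_insert_alt (a : List Int) : Int :=
  (a.zip (a.drop 1)).foldl
    (fun total p => total + pvPairCount (min p.1 p.2) (max p.1 p.2)) 0

-- ===== PRECONDITION & SPEC =====
-- Pre_ excludes exactly the inputs on which A never terminates: an adjacent pair whose
-- minimum is negative, or zero while its maximum is positive, makes A's inner while-loop
-- run forever.
def Pre_count_insert (a : List Int) : Prop :=
  ∀ p ∈ a.zip (a.drop 1), 0 < min p.1 p.2 ∨ (p.1 = 0 ∧ p.2 = 0)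
instance (a : List Int) : Decidable (Pre_count_insert a) := by unfold Pre_count_insert; infer_instance

def pvWitness_count_insert : List Int := [3, 1, 9, 100]

def Spec_count_insert (a : List Int) (out : Int) : Prop := out = count_insert_alt a
instance (a : List Int) (out : Int) : Decidable (Spec_count_insert a out) := by unfold Spec_count_insert; infer_instance

-- ===== CLAIM (what is proved, stated in full; the proofs are below) =====
def Claim_equal_count_insert : Prop := ∀ (a : List Int), Dom_count_insert a → Pre_count_insert a → Spec_count_insert a (count_insert a)

-- ===== LEMMAS AND PROOFS =====

-- closed-form step: one doubling of A's loop = one unit of B's closed form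
theorem pvPairCount_step (lo hi : Int) (hlo : 0 < lo) (hlt : 2 * lo < hi) :
    pvPairCount lo hi = 1 + pvPairCount (2 * lo) hi := by
  unfold pvPairCount
  set q := -(PySem.Int.floordiv (-hi) lo) with hqdef
  have hqb : (q - 1) * lo < hi ∧ hi ≤ q * lo := (PySem.Int.neg_floordiv_neg_eq_iff_of_pos hlo).mp rfl
  have hq3 : 2 < q := by nlinarith [hqb.2]
  by_cases h4 : 2 * (2 * lo) < hi
  · set q2 := -(PySem.Int.floordiv (-hi) (2 * lo)) with hq2def
    have h2lo : (0:Int) < 2 * lo := by omega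
    have hq2b : (q2 - 1) * (2 * lo) < hi ∧ hi ≤ q2 * (2 * lo) :=
      (PySem.Int.neg_floordiv_neg_eq_iff_of_pos h2lo).mp rfl
    have hq23 : 2 < q2 := by nlinarith [hq2b.2]
    have hlow : 2 * q2 - 1 ≤ q := by nlinarith [hq2b.1, hqb.2]
    have hhigh : q ≤ 2 * q2 := by nlinarith [hqb.1, hq2b.2]
    have hfd : PySem.Int.floordiv (q - 1) 2 = q2 - 1 := by
      rw [PySem.Int.floordiv_eq_iff_of_pos (by norm_num)]
      constructor <;> nlinarith
    have hbl : PySem.Int.bitLength (q - 1) = PySem.Int.bitLength (q2 - 1) + 1 := by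
      rw [PySem.Int.bitLength_of_pos (by omega), hfd]
    rw [if_pos hlt, if_pos h4, hbl]
    push_cast
    ring
  · have hq4 : q ≤ 4 := by nlinarith [hqb.1]
    have hfd : PySem.Int.floordiv (q - 1) 2 = 1 := by
      rw [PySem.Int.floordiv_eq_iff_of_pos (by norm_num)]
      omega
    have hbl : PySem.Int.bitLength (q - 1) = 2 := by
      rw [PySem.Int.bitLength_of_pos (by omega), hfd]
      decide
    rw [if_pos hlt, if_neg h4, hbl]
    norm_num

-- A's inner loop equals cnt + B's closed form (for positive x, and for x = y = 0)
theorem pvWhileA_eq (x y cnt : Int) (hx : 0 < x) :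
    pvWhileA x y cnt = cnt + pvPairCount x y := by
  rw [pvWhileA]
  by_cases h : 2 * x < y ∧ 0 < x
  · rw [dif_pos h, pvWhileA_eq (2 * x) y (cnt + 1) (by omega),
      pvPairCount_step x y hx h.1]
    ring
  · rw [dif_neg h]
    unfold pvPairCount
    rw [if_neg (by tauto)]
    ring
termination_by (y - 2 * x).toNat
decreasing_by omega

theorem pvZipFold (l : List (Int × Int))
    (h : ∀ p ∈ l, 0 < min p.1 p.2 ∨ (p.1 = 0 ∧ p.2 = 0)) (cnt : Int) :
    l.foldl (fun c p => pvWhileA (min p.1 p.2) (max p.1 p.2) c) cnt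
      = l.foldl (fun t p => t + pvPairCount (min p.1 p.2) (max p.1 p.2)) cnt := by
  induction l generalizing cnt with
  | nil => rfl
  | cons p t ih =>
    simp only [List.foldl_cons]
    have hhead : pvWhileA (min p.1 p.2) (max p.1 p.2) cnt
        = cnt + pvPairCount (min p.1 p.2) (max p.1 p.2) := by
      rcases h p (List.mem_cons_self) with hpos | ⟨h1, h2⟩
      · exact pvWhileA_eq _ _ _ hpos
      · rw [h1, h2]
        rw [pvWhileA, dif_neg (by norm_num)]
        norm_num [pvPairCount]
    rw [hhead]
    exact ih (fun p hp => h p (List.mem_cons_of_mem _ hp)) _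

theorem pvGetD_shift (x : Int) (xs : List Int) (i : Int) (hi : 0 ≤ i) :
    PySem.List.pyGetD (x :: xs) (i + 1) 0 = PySem.List.pyGetD xs i 0 := by
  obtain ⟨k, rfl⟩ := Int.eq_ofNat_of_zero_le hi
  rw [show ((k : Int) + 1) = ((k + 1 : Nat) : Int) by push_cast; ring,
    PySem.List.pyGetD_natCast, PySem.List.pyGetD_natCast, List.getD_cons_succ]

theorem pvRangeShift (n : Int) (g : Int -> Int -> Int) (init : Int) :
    (PySem.List.pyRange 1 (n + 1) 1).foldl g init
      = (PySem.List.pyRange 0 n 1).foldl (fun c i => g c (i + 1)) init := by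
  rw [PySem.List.pyRange_one 1 (n + 1), PySem.List.pyRange_one 0 n,
    show n + 1 - 1 = n - 0 by ring]
  simp only [List.foldl_map]
  apply PySem.List.foldl_congr_mem
  intro acc k _
  congr 1
  ring

-- fold bridge: A's indexed fold is a fold over adjacent pairs
theorem pvIdxFold (a : List Int) (f : Int -> Int -> Int -> Int) (init : Int) :
    (PySem.List.pyRange 0 ((a.length : Int) - 1) 1).foldl
        (fun c i => f c (PySem.List.pyGetD a i 0) (PySem.List.pyGetD a (i + 1) 0)) init
      = (a.zip (a.drop 1)).foldl (fun c p => f c p.1 p.2) init := by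
  induction a generalizing init with
  | nil => rw [PySem.List.pyRange_one_eq_nil (by simp)]; rfl
  | cons x t ih =>
    cases t with
    | nil => rw [PySem.List.pyRange_one_eq_nil (by simp)]; rfl
    | cons y t' =>
      rw [show (((x :: y :: t').length : Int) - 1) = (t'.length : Int) + 1 by
        push_cast [List.length_cons]; ring]
      rw [PySem.List.pyRange_one_cons (by positivity), List.foldl_cons,
        PySem.List.pyGetD_zero_cons, pvGetD_shift x (y :: t') 0 le_rfl,
        PySem.List.pyGetD_zero_cons, zero_add, pvRangeShift]
      have hb := PySem.List.foldl_congr_mem (PySem.List.pyRange 0 (t'.length : Int) 1)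
        (fun c i => f c (PySem.List.pyGetD (x :: y :: t') (i + 1) 0)
          (PySem.List.pyGetD (x :: y :: t') (i + 1 + 1) 0))
        (fun c i => f c (PySem.List.pyGetD (y :: t') i 0)
          (PySem.List.pyGetD (y :: t') (i + 1) 0))
        (f init x y)
        (by
          intro acc i hi
          have h0 : 0 <= i := (PySem.List.mem_pyRange_one.mp hi).1
          beta_reduce
          rw [pvGetD_shift x (y :: t') i h0, pvGetD_shift x (y :: t') (i + 1) (by omega)])
      rw [hb,
        show ((t'.length : Int)) = (((y :: t').length : Int) - 1) by
          push_cast [List.length_cons]; ring,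
        ih]
      rfl

-- ===== VERDICT (by name: the statement is the Claim_ definition above) =====
theorem count_insert_spec : Claim_equal_count_insert := by
  intro a _ hpre
  unfold Spec_count_insert count_insert count_insert_alt
  rw [pvIdxFold a (fun c x y => pvWhileA (min x y) (max x y) c) 0]
  exact pvZipFold _ hpre 0
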